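-- pv_equiv track=rewrite | github.com/dwijeshBharadwaj/PDFScrapingToExcel | reactdjango/blog/views.py | extract_question_data_from_text
-- ===== SOURCE A (Python) =====
-- question_identifiers = ["Q3", "Q5", "Q7", "Q9", "Q11", "Q13", "Q15", "Q17"]
--
-- data_span = 21
--
-- def extract_question_data_from_text(text):
--     questions_data_dict = {}
--     for question in question_identifiers:
--         start_indexes = [i for i, x in enumerate(text) if x == question]
--         if start_indexes:
--             start_index = start_indexes[0]
--             end_index = start_index + data_span
--             question_data = text[start_index:end_index + 1]
--             questions_data_dict[question] = question_data
--         else: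
--             questions_data_dict[question] = []
--     return questions_data_dict
-- ===== SOURCE B (Python) =====
-- question_identifiers = ["Q3", "Q5", "Q7", "Q9", "Q11", "Q13", "Q15", "Q17"]
--
-- data_span = 21
--
-- def extract_question_data_from_text(text):
--     # Single streaming pass: when an identifier is first seen, open a window
--     # for it; every subsequent element is fed into each window that is not yet
--     # full (data_span + 1 elements).  No index arithmetic and no slicing.
--     buffers = []  # (question, window collected so far), in discovery order
--     for x in text:
--         buffers = [(q, buf + [x]) if len(buf) <= data_span else (q, buf)
--                    for q, buf in buffers]
--         if x in question_identifiers and all(q != x for q, _ in buffers):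
--             buffers.append((x, [x]))
--     result = {}
--     for q in question_identifiers:
--         result[q] = next((buf for k, buf in buffers if k == q), [])
--     return result
-- ===== Notes on version B (the rewrite author's own statement) =====
-- stated objective: alternative
-- what changed: Replaces A's eight full scans plus index arithmetic and slicing with one streaming pass that opens a window when an identifier is first seen and feeds subsequent elements into every not-yet-full window, so the result is accumulated online with no indices or slices at all.
import Mathlib
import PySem

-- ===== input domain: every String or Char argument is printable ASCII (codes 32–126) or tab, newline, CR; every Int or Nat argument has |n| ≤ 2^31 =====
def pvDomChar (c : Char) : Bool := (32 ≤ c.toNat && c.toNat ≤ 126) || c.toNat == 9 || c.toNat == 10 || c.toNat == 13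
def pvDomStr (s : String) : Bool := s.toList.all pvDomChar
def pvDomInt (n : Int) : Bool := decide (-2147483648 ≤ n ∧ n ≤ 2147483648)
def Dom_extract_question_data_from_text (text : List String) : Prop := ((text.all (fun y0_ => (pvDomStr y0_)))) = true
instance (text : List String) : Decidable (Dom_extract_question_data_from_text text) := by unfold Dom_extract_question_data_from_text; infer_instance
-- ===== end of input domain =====

-- B replaces A's eight scan-and-slice passes with one streaming pass that accumulates each
-- question's window online (alternative decomposition, not claimed faster).

-- module constants shared by A and B
def question_identifiers : List String := ["Q3", "Q5", "Q7", "Q9", "Q11", "Q13", "Q15", "Q17"]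
def data_span : Int := 21

-- ===== PORT A =====
def extract_question_data_from_text (text : List String) : List (String × List String) :=
  (question_identifiers.foldl
    (fun (d : PySem.Dict String (List String)) question =>
      let start_indexes := ((PySem.List.enumerate text).filter (fun p => p.2 == question)).map (·.1)
      match start_indexes with
      | start_index :: _ =>
          let end_index := start_index + data_span
          d.insert question (PySem.List.slice text (some start_index) (some (end_index + 1)))
      | [] => d.insert question [])
    PySem.Dict.empty).items

-- ===== PORT B =====
-- one element of the streaming pass: feed x into every not-yet-full window, then
-- open a window for x if it is an identifier without one
def pvStep (buffers : List (String × List String)) (x : String) : List (String × List String) :=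
  let buffers' := buffers.map (fun p =>
    if (p.2.length : Int) ≤ data_span then (p.1, p.2 ++ [x]) else (p.1, p.2))
  if question_identifiers.contains x && buffers'.all (fun p => p.1 != x)
  then buffers' ++ [(x, [x])] else buffers'

-- next((buf for k, buf in buffers if k == q), [])
def pvLookup : List (String × List String) → String → List String
  | [], _ => []
  | (k, v) :: rest, q => if k == q then v else pvLookup rest q

def extract_question_data_from_text_alt (text : List String) : List (String × List String) :=
  let buffers := text.foldl pvStep []
  (question_identifiers.foldl
    (fun (r : PySem.Dict String (List String)) q => r.insert q (pvLookup buffers q))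
    PySem.Dict.empty).items

-- ===== PRECONDITION & SPEC =====
def Spec_extract_question_data_from_text (text : List String) (out : List (String × List String)) : Prop := out = extract_question_data_from_text_alt text
instance (text : List String) (out : List (String × List String)) : Decidable (Spec_extract_question_data_from_text text out) := by unfold Spec_extract_question_data_from_text; infer_instance

-- ===== CLAIM (what is proved, stated in full; the proofs are below) =====
def Claim_equal_extract_question_data_from_text : Prop := ∀ (text : List String), Dom_extract_question_data_from_text text → Spec_extract_question_data_from_text text (extract_question_data_from_text text)

-- ===== LEMMAS AND PROOFS =====

-- Option-valued first lookup, used to state the loop invariant.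
def pvLook0 : List (String × List String) → String → Option (List String)
  | [], _ => none
  | (k, v) :: rest, q => if k == q then some v else pvLook0 rest q

-- index of the first occurrence (proof-side mirror of A's first start index)
def pvFirstIdx : List String → String → Option Nat
  | [], _ => none
  | y :: ys, q => if y == q then some 0 else (pvFirstIdx ys q).map (· + 1)

theorem pvLookup_eq_look0 (l : List (String × List String)) (q : String) :
    pvLookup l q = (pvLook0 l q).getD [] := by
  induction l with
  | nil => rfl
  | cons p rest ih => cases p with | mk k v => simp only [pvLookup, pvLook0]; split <;> simp [ih]

theorem pvLook0_map (l : List (String × List String)) (h : List String → List String) (q : String) :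
    pvLook0 (l.map (fun p => (p.1, h p.2))) q = (pvLook0 l q).map h := by
  induction l with
  | nil => rfl
  | cons p rest ih => cases p with | mk k v => simp only [List.map_cons, pvLook0]; split <;> simp [ih]

theorem pvLook0_append_single (l : List (String × List String)) (x : String) (v : List String) (q : String) :
    pvLook0 (l ++ [(x, v)]) q = (pvLook0 l q).or (if x == q then some v else none) := by
  induction l with
  | nil => simp [pvLook0]
  | cons p rest ih => cases p with | mk k w => simp only [List.cons_append, pvLook0]; split <;> simp [ih]

theorem pvAll_ne_eq_isNone (l : List (String × List String)) (x : String) :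
    l.all (fun p => p.1 != x) = (pvLook0 l x).isNone := by
  induction l with
  | nil => rfl
  | cons p rest ih =>
    cases p with | mk k w =>
    by_cases hk : k = x
    · subst hk; simp [pvLook0]
    · simp [pvLook0, hk, bne_iff_ne, ih]

theorem pvFirstIdx_append_single (pre : List String) (x q : String) :
    pvFirstIdx (pre ++ [x]) q =
      (pvFirstIdx pre q).or ((if x == q then some 0 else none).map (· + pre.length)) := by
  induction pre with
  | nil => cases hxq : (x == q) <;> simp [pvFirstIdx, hxq]
  | cons y ys ih =>
    simp only [List.cons_append, pvFirstIdx]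
    split
    · simp
    · rw [ih]
      cases pvFirstIdx ys q with
      | some j => simp
      | none => split <;> simp [List.length_cons] <;> omega

theorem pvFirstIdx_lt_length (pre : List String) (q : String) (i : Nat)
    (h : pvFirstIdx pre q = some i) : i < pre.length := by
  induction pre generalizing i with
  | nil => simp [pvFirstIdx] at h
  | cons y ys ih =>
    simp only [pvFirstIdx] at h
    split at h
    · cases h; simp
    · cases hj : pvFirstIdx ys q with
      | none => rw [hj] at h; simp at h
      | some j =>
        rw [hj] at h; simp at h
        have := ih j hj
        simp; omega

-- the single window-extension step applied to a 22-capped window of d equals the cap of d ++ [x]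
theorem pvWindow_grow (d : List String) (x : String) :
    (if ((d.take 22).length : Int) ≤ data_span then d.take 22 ++ [x] else d.take 22) =
      (d ++ [x]).take 22 := by
  by_cases hlen : d.length ≤ 21
  · have ht : d.take 22 = d := List.take_of_length_le (by omega)
    have hc : ((d.take 22).length : Int) ≤ data_span := by
      rw [ht]; unfold data_span; exact_mod_cast hlen
    rw [if_pos hc, ht, List.take_of_length_le (by simp; omega)]
  · have hl : ((d.take 22).length : Int) = 22 := by
      rw [List.length_take]; norm_cast; omega
    have hc : ¬ ((d.take 22).length : Int) ≤ data_span := by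
      rw [hl]; unfold data_span; norm_num
    rw [if_neg hc, List.take_append_of_le_length (by omega)]

-- the invariant of the streaming pass: after processing `pre`, the window stored for q
-- is the (≤ 22)-element segment of `pre` starting at q's first occurrence
def pvInv (pre : List String) (buffers : List (String × List String)) : Prop :=
  ∀ q : String, pvLook0 buffers q =
    (if question_identifiers.contains q then
      (pvFirstIdx pre q).map (fun i => (pre.drop i).take 22)
     else none)

theorem pvStep_inv (pre : List String) (buffers : List (String × List String)) (x : String)
    (H : pvInv pre buffers) : pvInv (pre ++ [x]) (pvStep buffers x) := by
  have hmapform : (fun (p : String × List String) =>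
        if (p.2.length : Int) ≤ data_span then (p.1, p.2 ++ [x]) else (p.1, p.2)) =
      (fun p => (p.1, if (p.2.length : Int) ≤ data_span then p.2 ++ [x] else p.2)) := by
    funext p; split <;> simp_all
  set h : List String → List String :=
    fun v => if (v.length : Int) ≤ data_span then v ++ [x] else v with hh
  set B' : List (String × List String) := buffers.map (fun p =>
    if (p.2.length : Int) ≤ data_span then (p.1, p.2 ++ [x]) else (p.1, p.2)) with hB'
  have hmap : ∀ r, pvLook0 B' r = (pvLook0 buffers r).map h := by
    intro r; rw [hB', hmapform]; exact pvLook0_map buffers h r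
  intro q
  have hstep : pvStep buffers x =
      (if question_identifiers.contains x && B'.all (fun p => p.1 != x)
       then B' ++ [(x, [x])] else B') := rfl
  rw [hstep, pvFirstIdx_append_single]
  by_cases hq : question_identifiers.contains q = true
  · rw [if_pos hq]
    cases hfi : pvFirstIdx pre q with
    | some i =>
      have hb : pvLook0 buffers q = some ((pre.drop i).take 22) := by
        rw [H q, if_pos hq, hfi]; rfl
      have hix : i < pre.length := pvFirstIdx_lt_length pre q i hfi
      have hdrop : (pre ++ [x]).drop i = pre.drop i ++ [x] :=
        List.drop_append_of_le_length (le_of_lt hix)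
      have hB'q : pvLook0 B' q = some ((pre.drop i ++ [x]).take 22) := by
        rw [hmap, hb, Option.map_some, hh]
        exact congrArg some (pvWindow_grow (pre.drop i) x)
      split
      · rw [pvLook0_append_single, hB'q]
        by_cases hxq : x = q
        · subst hxq
          exfalso
          next hcond =>
          rw [pvAll_ne_eq_isNone, hmap, hb] at hcond
          simp at hcond
        · simp [Option.or, hdrop]
      · rw [hB'q]; simp [Option.or, hdrop]
    | none =>
      have hb : pvLook0 buffers q = none := by rw [H q, if_pos hq, hfi]; rfl
      have hB'q : pvLook0 B' q = none := by rw [hmap, hb]; rfl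
      by_cases hxq : x = q
      · subst hxq
        have hcond : (question_identifiers.contains x && B'.all (fun p => p.1 != x)) = true := by
          rw [pvAll_ne_eq_isNone, hmap x, hb]; simpa using hq
        rw [if_pos hcond, pvLook0_append_single, hB'q]
        simp [List.drop_append_of_le_length (le_refl pre.length)]
      · have hxq' : (x == q) = false := beq_false_of_ne hxq
        split
        · rw [pvLook0_append_single, hB'q, hxq']; simp [Option.or]
        · rw [hB'q]; simp [hxq']
  · rw [if_neg hq]
    have hb : pvLook0 buffers q = none := by rw [H q, if_neg hq]
    have hB'q : pvLook0 B' q = none := by rw [hmap, hb]; rfl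
    split
    · next hcond =>
      rw [pvLook0_append_single, hB'q]
      have hxq : (x == q) = false := by
        by_contra hc
        have hx : x = q := by cases hxx : (x == q) <;> simp_all
        subst hx
        rw [Bool.and_eq_true] at hcond
        exact hq hcond.1
      rw [hxq]; rfl
    · exact hB'q

theorem pvFold_inv : ∀ (rest pre : List String) (buffers : List (String × List String)),
    pvInv pre buffers → pvInv (pre ++ rest) (rest.foldl pvStep buffers) := by
  intro rest
  induction rest with
  | nil => intro pre buffers H; simpa using H
  | cons x rest ih =>
    intro pre buffers H
    have := ih (pre ++ [x]) (pvStep buffers x) (pvStep_inv pre buffers x H)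
    simpa using this

theorem pvBuffers_inv (text : List String) : pvInv text (text.foldl pvStep []) := by
  have h0 : pvInv [] [] := by
    intro q; cases hc : question_identifiers.contains q <;> simp [pvLook0, pvFirstIdx, hc]
  have := pvFold_inv text [] [] h0
  rwa [List.nil_append] at this

-- A's start-index list head is the first-occurrence index
theorem pvHead_filter_enumerate (q : String) :
    ∀ (xs : List String) (s : Int),
      (((PySem.List.enumerate xs s).filter (fun p => p.2 == q)).map (·.1)).head? =
        (pvFirstIdx xs q).map (fun n => s + (n : Int)) := by
  intro xs
  induction xs with
  | nil => intro s; simp [PySem.List.enumerate_nil, pvFirstIdx]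
  | cons y ys ih =>
    intro s
    rw [PySem.List.enumerate_cons]
    by_cases hy : (y == q) = true
    · simp [List.filter_cons, hy, pvFirstIdx]
    · simp only [List.filter_cons, hy, Bool.false_eq_true, not_false_iff, ite_false, pvFirstIdx]
      rw [ih (s + 1)]
      cases pvFirstIdx ys q <;> simp <;> push_cast <;> ring

-- ===== VERDICT (by name: the statement is the Claim_ definition above) =====
theorem extract_question_data_from_text_spec : Claim_equal_extract_question_data_from_text := by
  intro text _
  unfold Spec_extract_question_data_from_text extract_question_data_from_text extract_question_data_from_text_alt
  simp only []
  congr 1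
  apply PySem.List.foldl_congr_mem
  intro d q hq
  have hcont : question_identifiers.contains q = true := by
    exact List.elem_iff.mpr hq
  have hinv := pvBuffers_inv text q
  rw [if_pos hcont] at hinv
  rw [pvLookup_eq_look0, hinv]
  have hhead := pvHead_filter_enumerate q text 0
  cases hfi : pvFirstIdx text q with
  | none =>
    rw [hfi] at hhead
    cases hl : (((PySem.List.enumerate text).filter (fun p => p.2 == q)).map (·.1)) with
    | nil => rfl
    | cons a rest => rw [hl] at hhead; simp at hhead
  | some n =>
    rw [hfi] at hhead
    simp only [Option.map_some, zero_add] at hhead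
    obtain ⟨rest, hrest⟩ : ∃ rest,
        (((PySem.List.enumerate text).filter (fun p => p.2 == q)).map (·.1)) = (n : Int) :: rest := by
      cases hl : (((PySem.List.enumerate text).filter (fun p => p.2 == q)).map (·.1)) with
      | nil => rw [hl] at hhead; simp at hhead
      | cons a rest =>
        rw [hl] at hhead; simp at hhead
        exact ⟨rest, by rw [hhead]⟩
    rw [hrest]
    simp only [Option.getD_some]
    have hsl : PySem.List.slice text (some (n : Int)) (some ((n : Int) + data_span + 1)) =
        (text.drop n).take 22 := by
      have h22 : ((n : Int) + data_span + 1) = ((n : Int) + ((22 : Nat) : Int)) := by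
        unfold data_span; push_cast; ring
      rw [h22, PySem.List.slice_natCast_add]
    rw [hsl]
    rfl
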